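-- pv_equiv track=rewrite | github.com/DanK2095/HOOMAN-code | Python code/string.py | isstring
-- ===== SOURCE A (Python) =====
-- def isstring(x):
--     y = 0
--     w = []
--     for i in x:
--         if ord(i) <= 57 and ord(i) >= 48:
--             w.append(1)
--         else:
--             w.append(0)
--     for i in w:
--         if i != y:
--             return False
--         else:
--             continue
--
--     return True
-- ===== SOURCE B (Python) =====
-- def isstring(x):
--     for c in x:
--         if 48 <= ord(c) <= 57:
--             return False
--     return True
-- ===== Notes on version B (the rewrite author's own statement) =====
-- stated objective: simpler
-- what changed: B replaces A's build-a-flag-list-then-rescan (two passes and an intermediate list w) with a single early-exit scan over the characters, skipping the list construction.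
import Mathlib
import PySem

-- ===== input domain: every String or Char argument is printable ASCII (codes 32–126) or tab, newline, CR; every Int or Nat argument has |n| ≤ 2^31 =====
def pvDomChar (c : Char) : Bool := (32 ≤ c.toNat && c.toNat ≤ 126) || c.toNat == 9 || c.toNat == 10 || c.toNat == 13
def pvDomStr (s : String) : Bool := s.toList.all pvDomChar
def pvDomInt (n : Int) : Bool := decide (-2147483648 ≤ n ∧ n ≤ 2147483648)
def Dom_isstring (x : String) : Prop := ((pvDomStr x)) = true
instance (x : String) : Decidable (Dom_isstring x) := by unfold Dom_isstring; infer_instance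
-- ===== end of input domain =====

-- B drops A's intermediate flag list and second scan: one early-exit pass over the characters.

-- ===== PORT A =====
-- first loop of A: build the list w of 1/0 flags
def isstringFlags (cs : List Char) : List Int :=
  cs.foldl (fun w i => if i.toNat ≤ 57 ∧ i.toNat ≥ 48 then w ++ [1] else w ++ [0]) []

-- second loop of A: return False at the first i ≠ 0, else True
def isstringScan : List Int → Bool
  | [] => true
  | i :: rest => if i ≠ 0 then false else isstringScan rest

def isstring (x : String) : Bool :=
  isstringScan (isstringFlags x.toList)

-- ===== PORT B =====
def isstringAltLoop : List Char → Bool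
  | [] => true
  | c :: rest => if 48 ≤ c.toNat ∧ c.toNat ≤ 57 then false else isstringAltLoop rest

def isstring_alt (x : String) : Bool := isstringAltLoop x.toList

-- ===== PRECONDITION & SPEC =====
def Spec_isstring (x : String) (out : Bool) : Prop := out = isstring_alt x
instance (x : String) (out : Bool) : Decidable (Spec_isstring x out) := by unfold Spec_isstring; infer_instance

-- ===== CLAIM (what is proved, stated in full; the proofs are below) =====
def Claim_equal_isstring : Prop := ∀ (x : String), Dom_isstring x → Spec_isstring x (isstring x)

-- ===== LEMMAS AND PROOFS =====

lemma isstringFlags_general (cs : List Char) (w : List Int) :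
    cs.foldl (fun w i => if i.toNat ≤ 57 ∧ i.toNat ≥ 48 then w ++ [1] else w ++ [0]) w
      = w ++ isstringFlags cs := by
  induction cs generalizing w with
  | nil => simp [isstringFlags]
  | cons c rest ih =>
    unfold isstringFlags
    simp only [List.foldl_cons]
    rw [ih, ih]
    split_ifs <;> simp

lemma isstringFlags_cons (c : Char) (cs : List Char) :
    isstringFlags (c :: cs) =
      (if c.toNat ≤ 57 ∧ c.toNat ≥ 48 then (1:Int) else 0) :: isstringFlags cs := by
  unfold isstringFlags
  rw [List.foldl_cons, isstringFlags_general]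
  split_ifs <;> simp [isstringFlags]

lemma main_lemma (cs : List Char) :
    isstringScan (isstringFlags cs) = isstringAltLoop cs := by
  induction cs with
  | nil => rfl
  | cons c rest ih =>
    rw [isstringFlags_cons, isstringScan]
    by_cases h : c.toNat ≤ 57 ∧ c.toNat ≥ 48
    · simp [h, isstringAltLoop]
    · have h' : ¬ (48 ≤ c.toNat ∧ c.toNat ≤ 57) := fun ⟨a, b⟩ => h ⟨b, a⟩
      simp [h, isstringAltLoop, h', ih]

-- ===== VERDICT (by name: the statement is the Claim_ definition above) =====
theorem isstring_spec : Claim_equal_isstring := by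
  intro x _
  unfold Spec_isstring isstring isstring_alt
  exact main_lemma x.toList
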